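-- pv_equiv track=rewrite | github.com/daniel-reich/turbo-robot | Wd9cCvFKC3fHzgqSx_9.py | num_split
-- ===== SOURCE A (Python) =====
-- def num_split(num):
--     r = []
--     if num < 0:
--         neg = "-"
--     else:
--         neg = ""
--     num = abs(num)
--     for i in range(len(str(num))):
--         add = neg + str(num)[i] + "0" * (len(str(num)) - i - 1)
--         r.append(int(add))
--     return r
-- ===== SOURCE B (Python) =====
-- def num_split(num):
--     sign = -1 if num < 0 else 1
--     n = abs(num)
--     result = []
--     for p in range(len(str(n)) - 1, -1, -1):
--         result.append(sign * (n // 10 ** p % 10) * 10 ** p)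
--     return result
-- ===== Notes on version B (the rewrite author's own statement) =====
-- stated objective: idiomatic
-- what changed: Replaces A's per-position string concatenation (sign char + digit char + trailing '0's) and re-parsing with int() by direct arithmetic extraction of each place value via floor division and modulo, iterating the exponent downwards.
import Mathlib
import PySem

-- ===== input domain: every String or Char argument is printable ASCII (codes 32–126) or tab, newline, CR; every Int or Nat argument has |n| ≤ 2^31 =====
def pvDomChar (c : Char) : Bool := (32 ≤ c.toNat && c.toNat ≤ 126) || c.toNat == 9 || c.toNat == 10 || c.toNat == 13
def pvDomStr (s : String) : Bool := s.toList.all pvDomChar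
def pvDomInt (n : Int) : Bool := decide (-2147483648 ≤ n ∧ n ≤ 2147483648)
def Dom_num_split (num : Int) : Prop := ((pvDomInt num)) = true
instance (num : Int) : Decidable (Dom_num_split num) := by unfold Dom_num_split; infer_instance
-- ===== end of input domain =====

-- B replaces A's string build-and-reparse per position (sign char + digit char + trailing zeros, fed to int())
-- by direct arithmetic place-value extraction (floor division / modulo) over the same positions.

-- ===== PORT A =====
-- int(add) always succeeds here (add is a sign plus digits), so the port reads the parse with .getD 0.
def num_split (num : Int) : List Int :=
  let neg : List Char := if num < 0 then ['-'] else []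
  let n : Int := |num|
  (PySem.List.pyRange 0 (PySem.List.len (PySem.Int.toChars n)) 1).foldl
    (fun r i =>
      let s : List Char := PySem.Int.toChars n
      let add : List Char :=
        neg ++ [PySem.List.pyGetD s i '0'] ++ List.replicate (PySem.List.len s - i - 1).toNat '0'
      r ++ [(PySem.Int.ofChars? add).getD 0]) []

-- ===== PORT B =====
def num_split_alt (num : Int) : List Int :=
  let sign : Int := if num < 0 then -1 else 1
  let n : Int := |num|
  (PySem.List.pyRange (PySem.List.len (PySem.Int.toChars n) - 1) (-1) (-1)).foldl
    (fun result p =>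
      result ++ [sign * (PySem.Int.mod (PySem.Int.floordiv n (10 ^ p.toNat)) 10) * 10 ^ p.toNat]) []

-- ===== PRECONDITION & SPEC =====
def Spec_num_split (num : Int) (out : List Int) : Prop := out = num_split_alt num
instance (num : Int) (out : List Int) : Decidable (Spec_num_split num out) := by unfold Spec_num_split; infer_instance

-- ===== CLAIM (what is proved, stated in full; the proofs are below) =====
def Claim_equal_num_split : Prop := ∀ (num : Int), Dom_num_split num → Spec_num_split num (num_split num)

-- ===== LEMMAS AND PROOFS =====

-- `Nat.toDigitsCore` with enough fuel, written as a structural recursion on the number.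
def pvDigits (n : Nat) : List Char :=
  if h : n / 10 = 0 then [Nat.digitChar (n % 10)]
  else pvDigits (n / 10) ++ [Nat.digitChar (n % 10)]
termination_by n
decreasing_by
  exact Nat.div_lt_self (Nat.pos_of_ne_zero (fun h0 => h (by simp [h0]))) (by norm_num)

lemma pvDigits_core (f : Nat) : ∀ (n : Nat) (l : List Char), n < f →
    Nat.toDigitsCore 10 f n l = pvDigits n ++ l := by
  induction f with
  | zero => intro n l h; exact absurd h (by omega)
  | succ f ih =>
    intro n l h
    rw [pvDigits]
    by_cases h10 : n / 10 = 0
    · simp [Nat.toDigitsCore, h10]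
    · have hn : 10 ≤ n := by
        rcases Nat.lt_or_ge n 10 with hlt | hge
        · exact absurd (Nat.div_eq_of_lt hlt) h10
        · exact hge
      have hrec : n / 10 < f := by
        have := Nat.div_lt_self (by omega : 0 < n) (by norm_num : 1 < 10)
        omega
      simp only [Nat.toDigitsCore, h10]
      rw [ih (n / 10) (Nat.digitChar (n % 10) :: l) hrec]
      simp

lemma pvDigits_toDigits (n : Nat) : Nat.toDigits 10 n = pvDigits n := by
  have := pvDigits_core (n + 1) n [] (by omega)
  simpa [Nat.toDigits] using this

lemma pvDigits_length_pos (n : Nat) : 0 < (pvDigits n).length := by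
  rw [pvDigits]; split <;> simp

lemma pvDigits_length_le (L : Nat) : ∀ (n : Nat), 0 < L → n < 10 ^ L → (pvDigits n).length ≤ L := by
  induction L with
  | zero => intro n h; omega
  | succ L ih =>
    intro n _ hn
    rw [pvDigits]
    split
    · simp
    · rename_i h10
      have hL : 0 < L := by
        by_contra hL0
        have : L = 0 := by omega
        subst this
        simp at hn
        exact h10 (Nat.div_eq_of_lt hn)
      have hdiv : n / 10 < 10 ^ L := by
        rw [Nat.div_lt_iff_lt_mul (by norm_num : 0 < 10)]
        calc n < 10 ^ (L + 1) := hn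
          _ = 10 ^ L * 10 := by ring
      have := ih (n / 10) hL hdiv
      simp
      omega

lemma pvDigits_get : ∀ (n i : Nat) (h : i < (pvDigits n).length),
    (pvDigits n)[i] = Nat.digitChar (n / 10 ^ ((pvDigits n).length - 1 - i) % 10) := by
  intro n
  induction n using Nat.strong_induction_on with
  | _ n IH =>
    intro i h
    by_cases h10 : n / 10 = 0
    · have hEq : pvDigits n = [Nat.digitChar (n % 10)] := by rw [pvDigits]; simp [h10]
      have hi : i = 0 := by have := h; rw [hEq] at this; simpa using this
      subst hi
      rw [List.getElem_of_eq hEq h]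
      have hlen1 : (pvDigits n).length = 1 := by simp [hEq]
      simp [hlen1]
    · have hn : 0 < n := by
        rcases Nat.eq_zero_or_pos n with h0 | h0
        · exact absurd (by simp [h0]) h10
        · exact h0
      have hEq : pvDigits n = pvDigits (n / 10) ++ [Nat.digitChar (n % 10)] := by
        rw [pvDigits]; simp [h10]
      have hlen : (pvDigits n).length = (pvDigits (n / 10)).length + 1 := by simp [hEq]
      have hpos := pvDigits_length_pos (n / 10)
      rw [List.getElem_of_eq hEq h]
      rcases Nat.lt_or_ge i (pvDigits (n / 10)).length with hi | hi
      · rw [List.getElem_append_left hi]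
        rw [IH (n / 10) (Nat.div_lt_self hn (by norm_num)) i hi]
        rw [hlen]
        have he : (pvDigits (n / 10)).length + 1 - 1 - i = ((pvDigits (n / 10)).length - 1 - i) + 1 := by
          omega
        rw [he, pow_succ', Nat.div_div_eq_div_mul]
      · have hi' : i = (pvDigits (n / 10)).length := by omega
        subst hi'
        rw [List.getElem_append_right (by omega)]
        rw [hlen]
        simp

-- Evaluation of int() on the strings A builds: a digit character followed by j zeros (optionally preceded by '-').
lemma pvOfChars_pos (v j : Nat) (hv : v < 10) (hj : j ≤ 9) :
    PySem.Int.ofChars? (Nat.digitChar v :: List.replicate j '0') = some ((v : Int) * 10 ^ j) := by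
  interval_cases v <;> interval_cases j <;> decide

lemma pvOfChars_neg (v j : Nat) (hv : v < 10) (hj : j ≤ 9) :
    PySem.Int.ofChars? ('-' :: Nat.digitChar v :: List.replicate j '0') = some (-((v : Int) * 10 ^ j)) := by
  interval_cases v <;> interval_cases j <;> decide

-- ===== VERDICT (by name: the statement is the Claim_ definition above) =====
theorem num_split_spec : Claim_equal_num_split := by
  intro num hdom
  show num_split num = num_split_alt num
  have hdom' : -2147483648 ≤ num ∧ num ≤ 2147483648 := by
    simpa [Dom_num_split, pvDomInt] using hdom
  have hm : num.natAbs ≤ 2147483648 := by omega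
  set m := num.natAbs with hmdef
  have habs : |num| = (m : Int) := Int.abs_eq_natAbs num
  have htc : PySem.Int.toChars |num| = pvDigits m := by
    rw [habs]
    simp [PySem.Int.toChars, pvDigits_toDigits]
  set L := (pvDigits m).length with hLdef
  have hLpos : 0 < L := pvDigits_length_pos m
  have hL10 : L ≤ 10 := by
    have hpow : (10 : Nat) ^ 10 = 10000000000 := by norm_num
    exact pvDigits_length_le 10 m (by norm_num) (by omega)
  simp only [num_split, num_split_alt, htc, PySem.List.len_eq, ← hLdef,
    PySem.List.foldl_append_singleton_eq_map, List.nil_append,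
    PySem.List.pyRange_one, PySem.List.pyRange_neg_one, List.map_map]
  have h1 : ((L : Int) - 0).toNat = L := by omega
  have h2 : ((L : Int) - 1 - -1).toNat = L := by omega
  rw [h1, h2]
  apply List.map_congr_left
  intro k hk
  rw [List.mem_range] at hk
  simp only [Function.comp_apply]
  -- the place value exponent
  set j := L - 1 - k with hjdef
  have hj9 : j ≤ 9 := by omega
  have hrep : ((L : Int) - (0 + (k : Int)) - 1).toNat = j := by omega
  have hp : ((L : Int) - 1 - (k : Int)).toNat = j := by omega
  have hv : m / 10 ^ j % 10 < 10 := Nat.mod_lt _ (by norm_num)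
  -- A's indexed character is the digit character of that place value
  have hget : PySem.List.pyGetD (pvDigits m) (0 + (k : Int)) '0'
      = Nat.digitChar (m / 10 ^ j % 10) := by
    rw [zero_add, PySem.List.pyGetD_natCast, List.getD_eq_getElem _ _ (by omega : k < (pvDigits m).length)]
    rw [pvDigits_get m k (by omega)]
  -- B's arithmetic on casts
  have hB : PySem.Int.mod (PySem.Int.floordiv (m : Int) (10 ^ ((L : Int) - 1 - (k : Int)).toNat)) 10
      = ((m / 10 ^ j % 10 : Nat) : Int) := by
    rw [hp]
    have : ((10 : Int) ^ j) = ((10 ^ j : Nat) : Int) := by push_cast; ring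
    rw [this, PySem.Int.floordiv_natCast]
    exact_mod_cast PySem.Int.mod_natCast (m / 10 ^ j) 10
  rw [habs, hget, hrep, hB, hp]
  by_cases hneg : num < 0
  · simp only [if_pos hneg]
    rw [show (['-'] ++ [Nat.digitChar (m / 10 ^ j % 10)] ++ List.replicate j '0')
        = '-' :: Nat.digitChar (m / 10 ^ j % 10) :: List.replicate j '0' by simp]
    rw [pvOfChars_neg _ _ hv hj9]
    simp only [Option.getD_some]
    ring
  · simp only [if_neg hneg]
    rw [show ([] ++ [Nat.digitChar (m / 10 ^ j % 10)] ++ List.replicate j '0')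
        = Nat.digitChar (m / 10 ^ j % 10) :: List.replicate j '0' by simp]
    rw [pvOfChars_pos _ _ hv hj9]
    simp only [Option.getD_some]
    ring
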